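-- pv_equiv track=rewrite | github.com/baebaemin/Solved_Algorithm | 프로그래머스/unrated/161990. 바탕화면 정리/바탕화면 정리.py | find
-- ===== SOURCE A (Python) =====
-- def find(arr):
--     row = len(arr)
--     foundSp = foundEp = False
--     for i in range(row):
--         if '#' in arr[i] and not foundSp:
--             foundSp = True
--             sp = i
--         if '#' in arr[(i+1)*-1] and not foundEp:
--             foundEp = True
--             ep = row-i
--         if foundSp and foundEp:
--             break
--     return sp, ep
-- ===== SOURCE B (Python) =====
-- def find(arr):
--     found = False
--     for i, row in enumerate(arr):
--         if '#' in row: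
--             if not found:
--                 sp = i
--                 found = True
--             ep = i + 1
--     return sp, ep
-- ===== Notes on version B (the rewrite author's own statement) =====
-- stated objective: simpler
-- what changed: Replaced A's dual-ended scan (indexing arr[i] and arr[-(i+1)] each iteration with two found-flags and an early break) with one plain left-to-right enumerate pass that records the first '#' row once and keeps updating the last-'#' end.
import Mathlib
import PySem

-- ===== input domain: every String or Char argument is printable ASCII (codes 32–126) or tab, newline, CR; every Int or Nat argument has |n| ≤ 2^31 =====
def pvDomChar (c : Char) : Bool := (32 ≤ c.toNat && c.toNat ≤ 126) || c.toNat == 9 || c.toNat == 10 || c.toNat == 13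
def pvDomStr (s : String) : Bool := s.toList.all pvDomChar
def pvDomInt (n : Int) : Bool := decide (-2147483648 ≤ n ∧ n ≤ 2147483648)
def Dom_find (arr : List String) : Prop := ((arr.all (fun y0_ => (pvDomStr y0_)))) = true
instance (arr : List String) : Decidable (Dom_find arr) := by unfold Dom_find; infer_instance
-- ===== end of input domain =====

-- B replaces A's dual-ended indexed scan with early break by a single forward enumerate pass (simpler).
-- On inputs with no '#' row both Pythons raise UnboundLocalError; Pre_find excludes exactly those.

-- ===== PORT A =====
-- '#' in s
def hasH (s : String) : Bool := PySem.Str.isIn "#" s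

-- A's for-loop with early break; sp/ep default 0 stands for Python's unbound locals,
-- only read when nothing was found (excluded by Pre_find).
def findA_loop (arr : List String) (i : Nat) (foundSp foundEp : Bool) (sp ep : Int) : Int × Int :=
  if i < arr.length then
    let p1 : Bool × Int :=
      if hasH (PySem.List.pyGetD arr (i : Int) "") && !foundSp then (true, (i : Int)) else (foundSp, sp)
    let p2 : Bool × Int :=
      if hasH (PySem.List.pyGetD arr (-((i : Int) + 1)) "") && !foundEp then (true, (arr.length : Int) - i)
      else (foundEp, ep)
    if p1.1 && p2.1 then (p1.2, p2.2)
    else findA_loop arr (i + 1) p1.1 p2.1 p1.2 p2.2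
  else (sp, ep)
termination_by arr.length - i

def find (arr : List String) : Int × Int := findA_loop arr 0 false false 0 0

-- ===== PORT B =====
-- Source B's single forward pass over enumerate(arr).
def findB_loop (xs : List String) (i : Int) (found : Bool) (sp ep : Int) : Int × Int :=
  match xs with
  | [] => (sp, ep)
  | row :: rest =>
    if hasH row then
      if !found then findB_loop rest (i + 1) true i (i + 1)
      else findB_loop rest (i + 1) found sp (i + 1)
    else findB_loop rest (i + 1) found sp ep

def find_alt (arr : List String) : Int × Int := findB_loop arr 0 false 0 0

-- ===== PRECONDITION & SPEC =====
-- Pre_ excludes inputs with no '#' in any row (including []): there both Pythons raise UnboundLocalError.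
def Pre_find (arr : List String) : Prop := arr.any hasH = true
instance (arr : List String) : Decidable (Pre_find arr) := by unfold Pre_find; infer_instance

def pvWitness_find : List String := [".", "#.", "x#"]

def Spec_find (arr : List String) (out : Int × Int) : Prop := out = find_alt arr
instance (arr : List String) (out : Int × Int) : Decidable (Spec_find arr out) := by unfold Spec_find; infer_instance

-- ===== CLAIM (what is proved, stated in full; the proofs are below) =====
def Claim_equal_find : Prop := ∀ (arr : List String), Dom_find arr → Pre_find arr → Spec_find arr (find arr)

-- ===== LEMMAS AND PROOFS =====

-- last '#' index via the reversed list: two cons facts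
theorem frev_cons_of_any (row : String) (rest : List String) (h : rest.any hasH = true) :
    (row :: rest).reverse.findIdx hasH = rest.reverse.findIdx hasH := by
  have hlt : rest.reverse.findIdx hasH < rest.reverse.length := by
    rw [List.findIdx_lt_length]
    simp only [List.any_eq_true] at h
    obtain ⟨x, hx, hpx⟩ := h
    exact ⟨x, by simpa using hx, hpx⟩
  simp only [List.reverse_cons, List.findIdx_append, if_pos hlt]

theorem frev_cons_of_not (row : String) (rest : List String) (h : rest.any hasH = false)
    (hr : hasH row = true) : (row :: rest).reverse.findIdx hasH = rest.length := by
  have hnone : ∀ x ∈ rest.reverse, hasH x = false := by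
    intro x hx
    have := List.any_eq_false.mp h
    exact Bool.eq_false_iff.mpr (this x (by simpa using hx))
  have heq : rest.reverse.findIdx hasH = rest.reverse.length :=
    List.findIdx_eq_length_of_false hnone
  simp only [List.reverse_cons, List.findIdx_append, heq, List.length_reverse, lt_irrefl,
    if_false, List.findIdx_cons, hr, cond_true, Nat.zero_add]

theorem B_none (xs : List String) (h : xs.any hasH = false) :
    ∀ (i : Int) (found : Bool) (sp ep : Int), findB_loop xs i found sp ep = (sp, ep) := by
  induction xs with
  | nil => intro i found sp ep; rfl
  | cons row rest ih =>
    intro i found sp ep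
    simp only [List.any_cons, Bool.or_eq_false_iff] at h
    simp only [findB_loop, h.1]
    exact ih h.2 _ _ _ _

theorem B_found (xs : List String) (h : xs.any hasH = true) :
    ∀ (i sp ep : Int), findB_loop xs i true sp ep =
      (sp, i + (xs.length : Int) - (xs.reverse.findIdx hasH : Int)) := by
  induction xs with
  | nil => simp at h
  | cons row rest ih =>
    intro i sp ep
    by_cases hr : hasH row = true
    · simp only [findB_loop, hr, if_true, Bool.not_true, Bool.false_eq_true, if_false]
      by_cases hrest : rest.any hasH = true
      · rw [ih hrest, frev_cons_of_any row rest hrest]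
        simp only [List.length_cons]; push_cast; ring_nf
      · rw [B_none rest (by simpa using hrest), frev_cons_of_not row rest (by simpa using hrest) hr]
        simp only [List.length_cons]; push_cast; ring_nf
    · have hrest : rest.any hasH = true := by
        simp only [List.any_cons, Bool.eq_false_iff.mpr hr, Bool.false_or] at h; exact h
      simp only [findB_loop, Bool.eq_false_iff.mpr hr, Bool.false_eq_true, if_false]
      rw [ih hrest, frev_cons_of_any row rest hrest]
      simp only [List.length_cons]; push_cast; ring_nf

theorem B_notfound (xs : List String) (h : xs.any hasH = true) :
    ∀ (i sp ep : Int), findB_loop xs i false sp ep =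
      (i + (xs.findIdx hasH : Int), i + (xs.length : Int) - (xs.reverse.findIdx hasH : Int)) := by
  induction xs with
  | nil => simp at h
  | cons row rest ih =>
    intro i sp ep
    by_cases hr : hasH row = true
    · simp only [findB_loop, hr, if_true, Bool.not_false, if_true]
      have hf : (row :: rest).findIdx hasH = 0 := by simp [List.findIdx_cons, hr]
      by_cases hrest : rest.any hasH = true
      · rw [B_found rest hrest, frev_cons_of_any row rest hrest, hf]
        simp only [List.length_cons]; push_cast; ring_nf
      · rw [B_none rest (by simpa using hrest), frev_cons_of_not row rest (by simpa using hrest) hr, hf]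
        simp only [List.length_cons]; push_cast; ring_nf
    · have hrest : rest.any hasH = true := by
        simp only [List.any_cons, Bool.eq_false_iff.mpr hr, Bool.false_or] at h; exact h
      simp only [findB_loop, Bool.eq_false_iff.mpr hr, Bool.false_eq_true, if_false]
      rw [ih hrest, frev_cons_of_any row rest hrest]
      have hf : (row :: rest).findIdx hasH = rest.findIdx hasH + 1 := by
        simp [List.findIdx_cons, Bool.eq_false_iff.mpr hr]
      rw [hf]
      simp only [List.length_cons]; push_cast; ring_nf

-- membership of '#' in arr ↔ in arr.reverse
theorem any_reverse (arr : List String) (h : arr.any hasH = true) : arr.reverse.any hasH = true := by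
  simpa using h

theorem A_loop (arr : List String) (hex : arr.any hasH = true) :
    ∀ (m i : Nat) (fS fE : Bool) (sp ep : Int), arr.length - i = m →
      fS = decide (arr.findIdx hasH < i) →
      (fS = true → sp = (arr.findIdx hasH : Int)) →
      fE = decide (arr.reverse.findIdx hasH < i) →
      (fE = true → ep = (arr.length : Int) - (arr.reverse.findIdx hasH : Int)) →
      findA_loop arr i fS fE sp ep =
        ((arr.findIdx hasH : Int), (arr.length : Int) - (arr.reverse.findIdx hasH : Int)) := by
  have hfl : arr.findIdx hasH < arr.length := by
    rw [List.findIdx_lt_length]; simpa [List.any_eq_true] using hex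
  have hfrl : arr.reverse.findIdx hasH < arr.length := by
    have := any_reverse arr hex
    have h2 : arr.reverse.findIdx hasH < arr.reverse.length := by
      rw [List.findIdx_lt_length]; simpa [List.any_eq_true] using this
    simpa using h2
  intro m
  induction m with
  | zero =>
    intro i fS fE sp ep hm hS hSv hE hEv
    have hni : arr.length ≤ i := by omega
    have hfS : fS = true := by rw [hS]; simp; omega
    have hfE : fE = true := by rw [hE]; simp; omega
    rw [findA_loop]
    simp only [if_neg (by omega : ¬ i < arr.length)]
    rw [hSv hfS, hEv hfE]
  | succ m ih =>
    intro i fS fE sp ep hm hS hSv hE hEv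
    by_cases hi : i < arr.length
    case neg =>
      have hfS : fS = true := by rw [hS]; simp; omega
      have hfE : fE = true := by rw [hE]; simp; omega
      rw [findA_loop]
      simp only [if_neg hi]
      rw [hSv hfS, hEv hfE]
    case pos =>
      -- the two rows read this iteration, in getD form
      have hget1 : PySem.List.pyGetD arr (i : Int) "" = arr.getD i "" :=
        PySem.List.pyGetD_natCast arr i ""
      have hcast : -((i : Int) + 1) = -(((i + 1 : Nat) : Int)) := by push_cast; ring
      have hidx : arr.length - (i + 1) = arr.length - 1 - i := by omega
      have hirev : i < arr.reverse.length := by simpa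
      have hrl : arr.reverse.length = arr.length := by simp
      have hget2 : PySem.List.pyGetD arr (-((i : Int) + 1)) "" = arr.reverse.getD i "" := by
        rw [hcast, PySem.List.pyGetD_neg_natCast arr (i + 1) "" (by omega) (by omega)]
        rw [List.getD_eq_getElem _ _ hirev]
        simp only [List.getElem_reverse, hidx]
      -- findIdx facts in getD form
      have hatF : hasH (arr.getD (arr.findIdx hasH) "") = true := by
        rw [List.getD_eq_getElem _ _ hfl]; exact List.findIdx_getElem
      have hbelow : ∀ j, j < arr.findIdx hasH → hasH (arr.getD j "") = false := by
        intro j hj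
        rw [List.getD_eq_getElem _ _ (lt_of_lt_of_le hj List.findIdx_le_length)]
        exact List.not_of_lt_findIdx hj
      have hfrl' : arr.reverse.findIdx hasH < arr.reverse.length := by simpa
      have hatFr : hasH (arr.reverse.getD (arr.reverse.findIdx hasH) "") = true := by
        rw [List.getD_eq_getElem _ _ hfrl']; exact List.findIdx_getElem
      have hbelowr : ∀ j, j < arr.reverse.findIdx hasH → hasH (arr.reverse.getD j "") = false := by
        intro j hj
        rw [List.getD_eq_getElem _ _ (lt_of_lt_of_le hj List.findIdx_le_length)]
        exact List.not_of_lt_findIdx hj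
      -- how the forward flag/value update
      have step1 : (if hasH (PySem.List.pyGetD arr (i : Int) "") && !fS then (true, (i : Int))
            else (fS, sp)) =
          ((decide (arr.findIdx hasH < i + 1) : Bool),
           if decide (arr.findIdx hasH < i + 1) = true then (arr.findIdx hasH : Int)
           else sp) := by
        rw [hget1]
        by_cases hflt : arr.findIdx hasH < i
        · have hfS : fS = true := by rw [hS]; simp [hflt]
          rw [hfS, hSv hfS]; simp
          exact Nat.le_of_lt hflt
        · have hfS : fS = false := by rw [hS]; simp [hflt]
          by_cases hh : hasH (arr.getD i "") = true
          · have hfe : arr.findIdx hasH = i := by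
              have hle : ¬ i < arr.findIdx hasH := fun hc => by
                rw [hbelow i hc] at hh; exact absurd hh (by simp)
              omega
            simp only [hfS, Bool.not_false, Bool.and_true, hh, if_true]
            simp [hfe]
          · have hne : arr.findIdx hasH ≠ i := fun hc => by rw [hc] at hatF; exact hh hatF
            have hhf : hasH (arr.getD i "") = false := Bool.eq_false_iff.mpr hh
            have hgt : i < arr.findIdx hasH :=
              Nat.lt_of_le_of_ne (Nat.le_of_not_lt hflt) (fun e => hne e.symm)
            have hd : decide (arr.findIdx hasH < i + 1) = false :=
              decide_eq_false (Nat.not_lt.mpr hgt)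
            simp only [hfS, Bool.not_false, Bool.and_true, hhf, Bool.false_eq_true, if_false, hd]
      -- how the backward flag/value update
      have step2 : (if hasH (PySem.List.pyGetD arr (-((i : Int) + 1)) "") && !fE then
              (true, (arr.length : Int) - i)
            else (fE, ep)) =
          ((decide (arr.reverse.findIdx hasH < i + 1) : Bool),
           if decide (arr.reverse.findIdx hasH < i + 1) = true then
             (arr.length : Int) - (arr.reverse.findIdx hasH : Int)
           else ep) := by
        rw [hget2]
        by_cases hflt : arr.reverse.findIdx hasH < i
        · have hfE : fE = true := by rw [hE]; simp [hflt]
          rw [hfE, hEv hfE]; simp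
          exact Nat.le_of_lt hflt
        · have hfE : fE = false := by rw [hE]; simp [hflt]
          by_cases hh : hasH (arr.reverse.getD i "") = true
          · have hfe : arr.reverse.findIdx hasH = i := by
              have hle : ¬ i < arr.reverse.findIdx hasH := fun hc => by
                rw [hbelowr i hc] at hh; exact absurd hh (by simp)
              omega
            simp only [hfE, Bool.not_false, Bool.and_true, hh, if_true]
            simp [hfe]
          · have hne : arr.reverse.findIdx hasH ≠ i := fun hc => by rw [hc] at hatFr; exact hh hatFr
            have hhf : hasH (arr.reverse.getD i "") = false := Bool.eq_false_iff.mpr hh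
            have hgt : i < arr.reverse.findIdx hasH :=
              Nat.lt_of_le_of_ne (Nat.le_of_not_lt hflt) (fun e => hne e.symm)
            have hd : decide (arr.reverse.findIdx hasH < i + 1) = false :=
              decide_eq_false (Nat.not_lt.mpr hgt)
            simp only [hfE, Bool.not_false, Bool.and_true, hhf, Bool.false_eq_true, if_false, hd]
      rw [findA_loop]
      simp only [if_pos hi, step1, step2]
      by_cases hboth : (decide (arr.findIdx hasH < i + 1) && decide (arr.reverse.findIdx hasH < i + 1)) = true
      · simp only [hboth, if_true]
        simp only [Bool.and_eq_true, decide_eq_true_eq] at hboth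
        simp [hboth.1, hboth.2]
      · simp only [hboth, Bool.false_eq_true, if_false]
        apply ih (i + 1) _ _ _ _ (by omega) rfl ?_ rfl ?_
        · intro h; simp only [h, if_true]
        · intro h; simp only [h, if_true]

-- ===== VERDICT (by name: the statement is the Claim_ definition above) =====
theorem find_spec : Claim_equal_find := by
  intro arr _ hpre
  have hex : arr.any hasH = true := hpre
  show find arr = find_alt arr
  rw [find, find_alt]
  rw [A_loop arr hex arr.length 0 false false 0 0 (by omega) (by simp) (by simp) (by simp) (by simp)]
  rw [B_notfound arr hex 0 0 0]
  simp
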